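-- pv_equiv track=rewrite | github.com/3137959601/myEVS_denoise | scripts/ED24_alg_evalu/summarize_best_params_ebf_optimized_ed24.py | _group_by_tag
-- ===== SOURCE A (Python) =====
-- from typing import Any, Iterable
--
-- def _group_by_tag(rows: Iterable[dict[str, str]]) -> dict[str, list[dict[str, str]]]:
--     g: dict[str, list[dict[str, str]]] = {}
--     for row in rows:
--         tag = (row.get("tag") or "").strip()
--         if not tag:
--             continue
--         g.setdefault(tag, []).append(row)
--     return g
-- ===== SOURCE B (Python) =====
-- from typing import Any, Iterable
--
-- def _group_by_tag(rows: Iterable[dict[str, str]]) -> dict[str, list[dict[str, str]]]: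
--     keyed = [((row.get("tag") or "").strip(), row) for row in rows]
--     tags = []
--     for k, _ in keyed:
--         if k and k not in tags:
--             tags.append(k)
--     return {k: [r for kk, r in keyed if kk == k] for k in tags}
-- ===== Notes on version B (the rewrite author's own statement) =====
-- stated objective: alternative
-- what changed: Replaces the single-pass setdefault-accumulation dict with a two-phase decomposition: first key every row and collect the distinct non-empty tags in first-occurrence order, then build each group by filtering the keyed list, so no mutable per-key lists are maintained during the scan.
import Mathlib
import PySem

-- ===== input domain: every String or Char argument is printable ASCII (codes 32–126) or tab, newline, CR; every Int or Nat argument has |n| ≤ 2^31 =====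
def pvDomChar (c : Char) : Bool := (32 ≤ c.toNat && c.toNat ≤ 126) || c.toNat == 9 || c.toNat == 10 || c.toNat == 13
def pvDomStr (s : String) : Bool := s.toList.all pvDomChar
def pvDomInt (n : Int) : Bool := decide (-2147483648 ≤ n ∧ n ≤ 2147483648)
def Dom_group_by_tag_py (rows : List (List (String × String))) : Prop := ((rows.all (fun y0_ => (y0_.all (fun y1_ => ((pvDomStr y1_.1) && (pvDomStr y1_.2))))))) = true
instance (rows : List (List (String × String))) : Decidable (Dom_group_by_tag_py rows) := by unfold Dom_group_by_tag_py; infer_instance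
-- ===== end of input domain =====

-- B groups rows by stripped tag via a two-phase decomposition (collect distinct tags, then
-- filter per tag) instead of A's single-pass setdefault accumulation; objective: alternative.

-- ===== PORT A =====
-- tag = (row.get("tag") or "").strip()  (get of a missing key and an empty value both strip to "")
def pvTagKey (row : List (String × String)) : String :=
  PySem.Str.strip (PySem.Dict.getD (PySem.Dict.mk row) "tag" "")

-- g.setdefault(tag, []).append(row) on the insertion-ordered association list
def pvAppendAt (g : List (String × List (List (String × String)))) (k : String)
    (r : List (String × String)) : List (String × List (List (String × String))) :=
  match g with
  | [] => [(k, [r])]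
  | (k', v) :: t => if k' = k then (k', v ++ [r]) :: t else (k', v) :: pvAppendAt t k r

def pvStepA (g : List (String × List (List (String × String))))
    (row : List (String × String)) : List (String × List (List (String × String))) :=
  let tag := pvTagKey row
  if tag = "" then g else pvAppendAt g tag row

def group_by_tag_py (rows : List (List (String × String))) :
    List (String × List (List (String × String))) :=
  rows.foldl pvStepA []

-- ===== PORT B =====
-- tags accumulation: if k and k not in tags: tags.append(k)
def pvSeenStep (acc : List String) (p : String × List (String × String)) : List String :=
  if p.1 ≠ "" ∧ p.1 ∉ acc then acc ++ [p.1] else acc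

def group_by_tag_py_alt (rows : List (List (String × String))) :
    List (String × List (List (String × String))) :=
  let keyed := rows.map (fun r => (pvTagKey r, r))
  let tags := keyed.foldl pvSeenStep []
  tags.map (fun k => (k, (keyed.filter (fun p => p.1 == k)).map Prod.snd))

-- ===== PRECONDITION & SPEC =====
def Spec_group_by_tag_py (rows : List (List (String × String))) (out : List (String × List (List (String × String)))) : Prop := out = group_by_tag_py_alt rows
instance (rows : List (List (String × String))) (out : List (String × List (List (String × String)))) : Decidable (Spec_group_by_tag_py rows out) := by unfold Spec_group_by_tag_py; infer_instance

-- ===== CLAIM (what is proved, stated in full; the proofs are below) =====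
def Claim_equal_group_by_tag_py : Prop := ∀ (rows : List (List (String × String))), Dom_group_by_tag_py rows → Spec_group_by_tag_py rows (group_by_tag_py rows)

-- ===== LEMMAS AND PROOFS =====

-- A's fold step expressed on the keyed pair, so both sides fold over the same keyed list
def pvStepA2 (g : List (String × List (List (String × String))))
    (p : String × List (String × String)) : List (String × List (List (String × String))) :=
  if p.1 = "" then g else pvAppendAt g p.1 p.2

-- B's final map, as a function of the keyed list
def pvBuild (keyed : List (String × List (String × String))) :
    List (String × List (List (String × String))) :=
  (keyed.foldl pvSeenStep []).map
    (fun k => (k, (keyed.filter (fun p => p.1 == k)).map Prod.snd))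

theorem pvSeen_no_empty (l : List (String × List (String × String))) :
    ∀ acc : List String, "" ∉ acc → "" ∉ l.foldl pvSeenStep acc := by
  induction l with
  | nil => intro acc h; simpa using h
  | cons p t ih =>
    intro acc h
    refine ih _ ?_
    unfold pvSeenStep
    split_ifs with hg
    · intro hmem
      rcases List.mem_append.mp hmem with h1 | h1
      · exact h h1
      · exact hg.1 ((List.mem_singleton.mp h1).symm)
    · exact h

theorem pvSeen_mono (l : List (String × List (String × String))) :
    ∀ (acc : List String) (k : String), k ∈ acc → k ∈ l.foldl pvSeenStep acc := by
  induction l with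
  | nil => intro acc k h; simpa using h
  | cons p t ih =>
    intro acc k h
    refine ih _ _ ?_
    unfold pvSeenStep
    split_ifs with hg
    · exact List.mem_append_left _ h
    · exact h

theorem pvSeen_nodup (l : List (String × List (String × String))) :
    ∀ acc : List String, acc.Nodup → (l.foldl pvSeenStep acc).Nodup := by
  induction l with
  | nil => intro acc h; simpa using h
  | cons p t ih =>
    intro acc h
    refine ih _ ?_
    unfold pvSeenStep
    split_ifs with hg
    · exact List.Nodup.append h (List.nodup_singleton _) (by
        intro a ha hb
        simp only [List.mem_singleton] at hb
        exact hg.2 (hb ▸ ha))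
    · exact h

theorem pvSeen_complete (l : List (String × List (String × String))) :
    ∀ (acc : List String) (k : String), k ≠ "" → k ∈ l.map Prod.fst →
      k ∈ l.foldl pvSeenStep acc := by
  induction l with
  | nil => intro acc k _ hmem; simp at hmem
  | cons p t ih =>
    intro acc k hk hmem
    simp only [List.map_cons, List.mem_cons] at hmem
    rcases hmem with heq | hmem
    · rw [List.foldl_cons]
      refine pvSeen_mono _ _ _ ?_
      unfold pvSeenStep
      split_ifs with hg
      · exact List.mem_append_right _ (by simp [heq])
      · push_neg at hg
        exact heq ▸ hg (heq ▸ hk)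
    · exact ih _ _ hk hmem

theorem pvAppendAt_not_mem (g : List (String × List (List (String × String)))) (k : String)
    (r : List (String × String)) (h : k ∉ g.map Prod.fst) :
    pvAppendAt g k r = g ++ [(k, [r])] := by
  induction g with
  | nil => rfl
  | cons q t ih =>
    simp only [List.map_cons, List.mem_cons] at h
    push_neg at h
    unfold pvAppendAt
    rw [if_neg (fun he => h.1 he.symm), ih h.2]
    rfl

theorem pvAppendAt_map (seen : List String)
    (f : String → List (List (String × String))) (t : String) (r : List (String × String))
    (hnd : seen.Nodup) (hmem : t ∈ seen) :
    pvAppendAt (seen.map (fun k => (k, f k))) t r =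
      seen.map (fun k => (k, if k = t then f k ++ [r] else f k)) := by
  induction seen with
  | nil => simp at hmem
  | cons s rest ih =>
    rcases List.nodup_cons.mp hnd with ⟨hs, hrest⟩
    by_cases he : s = t
    · subst he
      rw [List.map_cons, List.map_cons,
        show pvAppendAt ((s, f s) :: List.map (fun k => (k, f k)) rest) s r
            = (s, f s ++ [r]) :: List.map (fun k => (k, f k)) rest from by
          unfold pvAppendAt; rw [if_pos rfl]]
      congr 1
      · rw [if_pos rfl]
      · refine List.map_congr_left ?_
        intro k hk
        rw [if_neg (fun hkt : k = s => hs (hkt ▸ hk))]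
    · rcases List.mem_cons.mp hmem with h1 | h1
      · exact absurd h1.symm he
      · simp only [List.map_cons]
        unfold pvAppendAt
        rw [if_neg he, ih hrest h1, if_neg he]

theorem pvBuild_eq (l : List (String × List (String × String))) :
    pvBuild l = (l.foldl pvSeenStep []).map
      (fun k => (k, (l.filter (fun p => p.1 == k)).map Prod.snd)) := rfl

theorem pvMain (keyed : List (String × List (String × String))) :
    keyed.foldl pvStepA2 [] = pvBuild keyed := by
  induction keyed using List.reverseRecOn with
  | nil => rfl
  | append_singleton l p ih =>
    rw [List.foldl_append, List.foldl_cons, List.foldl_nil, ih]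
    have hB : pvBuild (l ++ [p]) = (pvSeenStep (l.foldl pvSeenStep []) p).map
        (fun k => (k, ((l ++ [p]).filter (fun q => q.1 == k)).map Prod.snd)) := by
      rw [pvBuild_eq, List.foldl_append, List.foldl_cons, List.foldl_nil]
    rw [hB]
    have hfil : ∀ k : String, k ≠ p.1 →
        ((l ++ [p]).filter (fun q => q.1 == k)).map Prod.snd
          = (l.filter (fun q => q.1 == k)).map Prod.snd := by
      intro k hk
      rw [List.filter_append]
      simp only [List.filter_cons, List.filter_nil]
      rw [if_neg (by simpa using fun he => hk he.symm)]
      simp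
    have hseen' : "" ∉ l.foldl pvSeenStep [] := pvSeen_no_empty l [] (by simp)
    by_cases ht : p.1 = ""
    · -- empty tag: both sides unchanged
      have hstep : pvStepA2 (pvBuild l) p = pvBuild l := by
        unfold pvStepA2; rw [if_pos ht]
      have hseen : pvSeenStep (l.foldl pvSeenStep []) p = l.foldl pvSeenStep [] := by
        unfold pvSeenStep
        rw [if_neg (by simp [ht])]
      rw [hstep, hseen, pvBuild_eq]
      refine List.map_congr_left ?_
      intro k hk
      rw [hfil k (fun he => hseen' ((he.trans ht) ▸ hk))]
    · have hnd : (l.foldl pvSeenStep []).Nodup := pvSeen_nodup l [] (by simp)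
      have hstep : pvStepA2 (pvBuild l) p = pvAppendAt (pvBuild l) p.1 p.2 := by
        unfold pvStepA2; rw [if_neg ht]
      by_cases hm : p.1 ∈ l.foldl pvSeenStep []
      · -- tag already seen: append the row to its existing group
        have hseen : pvSeenStep (l.foldl pvSeenStep []) p = l.foldl pvSeenStep [] := by
          unfold pvSeenStep
          rw [if_neg (by push_neg; intro _; exact hm)]
        rw [hstep, hseen, pvBuild_eq, pvAppendAt_map _ _ _ _ hnd hm]
        refine List.map_congr_left ?_
        intro k hk
        by_cases hkt : k = p.1
        · subst hkt
          rw [if_pos rfl, List.filter_append]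
          simp only [List.filter_cons, List.filter_nil]
          rw [if_pos (by simp)]
          rw [List.map_append]
          rfl
        · rw [if_neg hkt, hfil k hkt]
      · -- fresh tag: a new group appended at the end
        have hseen : pvSeenStep (l.foldl pvSeenStep []) p
            = l.foldl pvSeenStep [] ++ [p.1] := by
          unfold pvSeenStep
          rw [if_pos ⟨ht, hm⟩]
        have hfst : (pvBuild l).map Prod.fst = l.foldl pvSeenStep [] := by
          rw [pvBuild_eq, List.map_map]
          rw [show (Prod.fst ∘ fun k => (k, (l.filter (fun p => p.1 == k)).map Prod.snd))
                = id from rfl]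
          exact List.map_id _
        have hnofst : p.1 ∉ l.map Prod.fst := fun hin => hm (pvSeen_complete l [] p.1 ht hin)
        rw [hstep, pvAppendAt_not_mem _ _ _ (by rw [hfst]; exact hm), hseen,
          List.map_append]
        congr 1
        · rw [pvBuild_eq]
          refine List.map_congr_left ?_
          intro k hk
          rw [hfil k (fun he => hm (he ▸ hk))]
        · simp only [List.map_cons, List.map_nil]
          have hfl : l.filter (fun q => q.1 == p.1) = [] := by
            rw [List.filter_eq_nil_iff]
            intro q hq
            simp only [beq_iff_eq]
            exact fun he => hnofst (he ▸ List.mem_map_of_mem hq)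
          rw [List.filter_append, hfl]
          simp

-- bridge from A's fold over rows to the fold over the keyed list
theorem pvA_eq_foldl_keyed (rows : List (List (String × String))) :
    group_by_tag_py rows = (rows.map (fun r => (pvTagKey r, r))).foldl pvStepA2 [] := by
  rw [List.foldl_map]
  rfl

-- ===== VERDICT (by name: the statement is the Claim_ definition above) =====
theorem group_by_tag_py_spec : Claim_equal_group_by_tag_py := by
  intro rows _
  unfold Spec_group_by_tag_py group_by_tag_py_alt
  rw [pvA_eq_foldl_keyed, pvMain]
  rfl
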